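-- pv_equiv track=rewrite | github.com/mike-nott/mcp-assist | custom_components/mcp_assist/server_tools/weather.py | _select_preferred_weather_forecast_type
-- ===== SOURCE A (Python) =====
-- from typing import Any, Dict, List, Tuple
--
-- def _select_preferred_weather_forecast_type(
--     forecast_types: List[str] | set[str] | tuple[str, ...]
-- ) -> str | None:
--     """Choose a stable forecast-type fallback for weather responses."""
--     forecast_type_set = {str(item) for item in forecast_types if item}
--     for candidate in ("daily", "twice_daily", "hourly"):
--         if candidate in forecast_type_set:
--             return candidate
--     return next(iter(sorted(forecast_type_set)), None)
-- ===== SOURCE B (Python) =====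
-- from typing import Any, Dict, List, Tuple
--
-- _PREFERRED = ("daily", "twice_daily", "hourly")
--
--
-- def _forecast_type_rank_key(name):
--     rank = _PREFERRED.index(name) if name in _PREFERRED else len(_PREFERRED)
--     return (rank, name)
--
--
-- def _select_preferred_weather_forecast_type(
--     forecast_types: List[str] | set[str] | tuple[str, ...]
-- ) -> str | None:
--     """Choose a stable forecast-type fallback for weather responses."""
--     forecast_type_set = {str(item) for item in forecast_types if item}
--     return min(forecast_type_set, key=_forecast_type_rank_key, default=None)
-- ===== Notes on version B (the rewrite author's own statement) =====
-- stated objective: idiomatic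
-- what changed: Replaces the three-way candidate membership loop followed by sorted()[0] fallback with a single min() over the filtered set under a (preferred-rank, name) key.
import Mathlib
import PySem

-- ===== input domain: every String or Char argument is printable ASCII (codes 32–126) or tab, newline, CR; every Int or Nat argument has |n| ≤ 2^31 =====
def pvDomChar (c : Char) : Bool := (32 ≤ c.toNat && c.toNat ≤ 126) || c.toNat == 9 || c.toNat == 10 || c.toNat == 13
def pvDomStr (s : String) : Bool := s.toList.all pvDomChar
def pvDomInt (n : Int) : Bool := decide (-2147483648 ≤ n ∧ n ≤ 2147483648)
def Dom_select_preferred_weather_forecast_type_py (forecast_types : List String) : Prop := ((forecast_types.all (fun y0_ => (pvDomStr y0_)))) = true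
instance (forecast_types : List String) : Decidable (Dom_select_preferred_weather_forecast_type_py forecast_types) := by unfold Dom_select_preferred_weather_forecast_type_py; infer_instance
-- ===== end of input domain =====

-- B replaces A's candidate-membership loop plus sorted() fallback with a single min() under a (preferred-rank, name) key; same result, more idiomatic.

-- ===== PORT A =====
-- {str(item) for item in forecast_types if item}  (str(item) = item on strings; "" is the only falsy string)
def select_preferred_weather_forecast_type_py (forecast_types : List String) : Option String :=
  let forecast_type_set : PySem.Set String :=
    forecast_types.foldl (fun s item => if item ≠ "" then PySem.Set.add s item else s) PySem.Set.empty
  if "daily" ∈ forecast_type_set then some "daily"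
  else if "twice_daily" ∈ forecast_type_set then some "twice_daily"
  else if "hourly" ∈ forecast_type_set then some "hourly"
  else (PySem.List.sorted forecast_type_set (fun x => x) false).head?

-- ===== PORT B =====
-- rank = _PREFERRED.index(name) if name in _PREFERRED else len(_PREFERRED)
def pvForecastRank (name : String) : Nat :=
  match PySem.List.index? ["daily", "twice_daily", "hourly"] name with
  | some i => i
  | none => 3

-- min(forecast_type_set, key=_forecast_type_rank_key, default=None); the key is injective on the set, so the min is iteration-order independent
def select_preferred_weather_forecast_type_py_alt (forecast_types : List String) : Option String :=
  let forecast_type_set : PySem.Set String :=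
    forecast_types.foldl (fun s item => if item ≠ "" then PySem.Set.add s item else s) PySem.Set.empty
  PySem.List.min2? forecast_type_set pvForecastRank (fun name => name)

-- ===== PRECONDITION & SPEC =====
def Spec_select_preferred_weather_forecast_type_py (forecast_types : List String) (out : Option String) : Prop := out = select_preferred_weather_forecast_type_py_alt forecast_types
instance (forecast_types : List String) (out : Option String) : Decidable (Spec_select_preferred_weather_forecast_type_py forecast_types out) := by unfold Spec_select_preferred_weather_forecast_type_py; infer_instance

-- ===== CLAIM (what is proved, stated in full; the proofs are below) =====
def Claim_equal_select_preferred_weather_forecast_type_py : Prop := ∀ (forecast_types : List String), Dom_select_preferred_weather_forecast_type_py forecast_types → Spec_select_preferred_weather_forecast_type_py forecast_types (select_preferred_weather_forecast_type_py forecast_types)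

-- ===== LEMMAS AND PROOFS =====

-- lexicographic "≤" under the (rank, name) key
def pvLe (x y : String) : Prop :=
  pvForecastRank x < pvForecastRank y ∨ (pvForecastRank x = pvForecastRank y ∧ x ≤ y)

theorem pvRank_eq (y : String) :
    pvForecastRank y = if y = "daily" then 0 else if y = "twice_daily" then 1 else if y = "hourly" then 2 else 3 := by
  by_cases h1 : y = "daily"
  · subst h1; decide
  by_cases h2 : y = "twice_daily"
  · subst h2; decide
  by_cases h3 : y = "hourly"
  · subst h3; decide
  have hnone : List.idxOf? y ["daily", "twice_daily", "hourly"] = none := by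
    simp [List.idxOf?_eq_none_iff, h1, h2, h3]
  simp [pvForecastRank, PySem.List.index?, hnone, h1, h2, h3]

theorem pvLe_refl (x : String) : pvLe x x := Or.inr ⟨rfl, le_refl x⟩

theorem pvLe_antisymm {x y : String} (h1 : pvLe x y) (h2 : pvLe y x) : x = y := by
  rcases h1 with h1 | ⟨_, h1⟩ <;> rcases h2 with h2 | ⟨_, h2⟩ <;> first
    | omega
    | exact le_antisymm h1 h2

-- the step function of min2? with our key, named so the fold lemmas can mention it
def pvStep : Option String → String → Option String :=
  fun acc x =>
    match acc with
    | none => some x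
    | some m =>
      if (decide (pvForecastRank x < pvForecastRank m) ||
          !decide (pvForecastRank m < pvForecastRank x) && decide (x < m)) = true
      then some x else some m

theorem pvMin2_eq_foldl (ls : List String) :
    PySem.List.min2? ls pvForecastRank (fun name => name) = ls.foldl pvStep none := by
  unfold PySem.List.min2?
  apply PySem.List.foldl_congr_mem
  intro acc x _
  cases acc <;> rfl

-- the fold at the heart of min2?, with a some-accumulator: its result is a lex-minimum
theorem pvFold_min_some (ls : List String) (m : String) :
    ∃ m', ls.foldl pvStep (some m) = some m' ∧ (m' = m ∨ m' ∈ ls) ∧ pvLe m' m ∧ ∀ y ∈ ls, pvLe m' y := by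
  induction ls generalizing m with
  | nil => exact ⟨m, rfl, Or.inl rfl, pvLe_refl m, by simp⟩
  | cons x t ih =>
    by_cases hx : (decide (pvForecastRank x < pvForecastRank m) ||
        !decide (pvForecastRank m < pvForecastRank x) && decide (x < m)) = true
    · obtain ⟨m', hfold, hmem, hle, hall⟩ := ih x
      simp only [Bool.or_eq_true, Bool.and_eq_true, Bool.not_eq_true', decide_eq_true_eq,
        decide_eq_false_iff_not] at hx
      have hxm : pvLe x m := by
        rcases hx with hx | ⟨hx1, hx2⟩
        · exact Or.inl hx
        · rcases lt_trichotomy (pvForecastRank x) (pvForecastRank m) with h | h | h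
          · exact Or.inl h
          · exact Or.inr ⟨h, le_of_lt hx2⟩
          · exact absurd h hx1
      have hle' : pvLe m' m := by
        rcases hle with h | ⟨he, h⟩ <;> rcases hxm with h' | ⟨he', h'⟩
        · exact Or.inl (lt_trans h h')
        · exact Or.inl (by omega)
        · exact Or.inl (by omega)
        · exact Or.inr ⟨by omega, le_trans h h'⟩
      refine ⟨m', ?_, ?_, hle', ?_⟩
      · simp only [List.foldl_cons]
        rw [show pvStep (some m) x = some x from by
          simp only [pvStep]
          rw [if_pos (by simp only [Bool.or_eq_true, Bool.and_eq_true, Bool.not_eq_true',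
                decide_eq_true_eq, decide_eq_false_iff_not]; exact hx)]]
        exact hfold
      · rcases hmem with h | h
        · exact Or.inr (by simp [h])
        · exact Or.inr (by simp [h])
      · intro y hy
        rcases List.mem_cons.mp hy with rfl | hy
        · exact hle
        · exact hall y hy
    · obtain ⟨m', hfold, hmem, hle, hall⟩ := ih m
      simp only [Bool.or_eq_true, Bool.and_eq_true, Bool.not_eq_true', decide_eq_true_eq,
        decide_eq_false_iff_not] at hx
      push Not at hx
      have hmx : pvLe m x := by
        rcases lt_trichotomy (pvForecastRank m) (pvForecastRank x) with h | h | h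
        · exact Or.inl h
        · exact Or.inr ⟨h, le_of_not_gt (hx.2 (by omega))⟩
        · exact absurd h (by omega)
      refine ⟨m', ?_, ?_, hle, ?_⟩
      · simp only [List.foldl_cons]
        rw [show pvStep (some m) x = some m from by
          simp only [pvStep]
          rw [if_neg (by simp only [Bool.or_eq_true, Bool.and_eq_true, Bool.not_eq_true',
                decide_eq_true_eq, decide_eq_false_iff_not]; push Not; exact hx)]]
        exact hfold
      · rcases hmem with h | h
        · exact Or.inl h
        · exact Or.inr (by simp [h])
      · intro y hy
        rcases List.mem_cons.mp hy with rfl | hy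
        · -- y = x : chain pvLe m' m and pvLe m x
          rcases hle with h | ⟨he, h⟩ <;> rcases hmx with h' | ⟨he', h'⟩
          · exact Or.inl (lt_trans h h')
          · exact Or.inl (by omega)
          · exact Or.inl (by omega)
          · exact Or.inr ⟨by omega, le_trans h h'⟩
        · exact hall y hy

theorem pvMin2_spec (ls : List String) (m : String) (h : ls ≠ [])
    (he : PySem.List.min2? ls pvForecastRank (fun name => name) = some m) :
    m ∈ ls ∧ ∀ y ∈ ls, pvLe m y := by
  cases ls with
  | nil => exact absurd rfl h
  | cons x t =>
    obtain ⟨m', hfold, hmem, hle, hall⟩ := pvFold_min_some t x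
    rw [pvMin2_eq_foldl, List.foldl_cons, show pvStep none x = some x from rfl, hfold] at he
    obtain rfl : m' = m := Option.some.inj he
    refine ⟨?_, ?_⟩
    · rcases hmem with h | h
      · simp [h]
      · simp [h]
    · intro y hy
      rcases List.mem_cons.mp hy with rfl | hy
      · exact hle
      · exact hall y hy

theorem pvMin2_none (ls : List String) :
    PySem.List.min2? ls pvForecastRank (fun name => name) = none ↔ ls = [] := by
  cases ls with
  | nil => rw [pvMin2_eq_foldl]; simp
  | cons x t =>
    obtain ⟨m', hfold, _, _, _⟩ := pvFold_min_some t x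
    rw [pvMin2_eq_foldl, List.foldl_cons, show pvStep none x = some x from rfl, hfold]
    simp

-- the core equivalence, over an arbitrary element list L
theorem pvCore (L : List String) :
    (if "daily" ∈ L then some "daily"
     else if "twice_daily" ∈ L then some "twice_daily"
     else if "hourly" ∈ L then some "hourly"
     else (PySem.List.sorted L (fun x => x) false).head?) =
    PySem.List.min2? L pvForecastRank (fun name => name) := by
  by_cases hnil : L = []
  · subst hnil
    rw [pvMin2_eq_foldl]
    simp [PySem.List.sorted]
  · obtain ⟨m, hm⟩ : ∃ m, PySem.List.min2? L pvForecastRank (fun name => name) = some m := by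
      cases he : PySem.List.min2? L pvForecastRank (fun name => name) with
      | none => exact absurd ((pvMin2_none L).mp he) hnil
      | some m => exact ⟨m, rfl⟩
    obtain ⟨hmem, hall⟩ := pvMin2_spec L m hnil hm
    rw [hm]
    by_cases hd : "daily" ∈ L
    · have hmin : ∀ y ∈ L, pvLe "daily" y := by
        intro y hy
        by_cases h : y = "daily"
        · exact h ▸ pvLe_refl _
        · refine Or.inl ?_
          have h0 : pvForecastRank "daily" = 0 := by decide
          rw [h0, pvRank_eq y]
          split_ifs <;> omega
      rw [if_pos hd, pvLe_antisymm (hmin m hmem) (hall "daily" hd)]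
    · by_cases ht : "twice_daily" ∈ L
      · have hmin : ∀ y ∈ L, pvLe "twice_daily" y := by
          intro y hy
          by_cases h : y = "twice_daily"
          · exact h ▸ pvLe_refl _
          · refine Or.inl ?_
            have h1 : pvForecastRank "twice_daily" = 1 := by decide
            have hyd : y ≠ "daily" := fun e => hd (e ▸ hy)
            rw [h1, pvRank_eq y]
            split_ifs with a <;> first | exact absurd a hyd | omega
        rw [if_neg hd, if_pos ht, pvLe_antisymm (hmin m hmem) (hall "twice_daily" ht)]
      · by_cases hh : "hourly" ∈ L
        · have hmin : ∀ y ∈ L, pvLe "hourly" y := by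
            intro y hy
            by_cases h : y = "hourly"
            · exact h ▸ pvLe_refl _
            · refine Or.inl ?_
              have h2 : pvForecastRank "hourly" = 2 := by decide
              have hyd : y ≠ "daily" := fun e => hd (e ▸ hy)
              have hyt : y ≠ "twice_daily" := fun e => ht (e ▸ hy)
              rw [h2, pvRank_eq y]
              simp [hyd, hyt, h]
          rw [if_neg hd, if_neg ht, if_pos hh, pvLe_antisymm (hmin m hmem) (hall "hourly" hh)]
        · -- fallback: head of sorted L; every element has rank 3
          have rank3 : ∀ y ∈ L, pvForecastRank y = 3 := by
            intro y hy
            have hyd : y ≠ "daily" := fun e => hd (e ▸ hy)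
            have hyt : y ≠ "twice_daily" := fun e => ht (e ▸ hy)
            have hyh : y ≠ "hourly" := fun e => hh (e ▸ hy)
            rw [pvRank_eq y]
            simp [hyd, hyt, hyh]
          obtain ⟨a, t, hs⟩ : ∃ a t, PySem.List.sorted L (fun x => x) false = a :: t := by
            cases hs : PySem.List.sorted L (fun x => x) false with
            | nil => exact absurd ((PySem.List.sorted_eq_nil_iff L _ false).mp hs) hnil
            | cons a t => exact ⟨a, t, rfl⟩
          have haL : a ∈ L := (PySem.List.mem_sorted L _ false a).mp (hs ▸ List.mem_cons_self)
          have hmin : ∀ y ∈ L, pvLe a y := by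
            intro y hy
            exact Or.inr ⟨by rw [rank3 a haL, rank3 y hy],
              PySem.List.key_head_sorted_le L (fun x => x) hs y hy⟩
          rw [if_neg hd, if_neg ht, if_neg hh, hs]
          simp only [List.head?_cons]
          rw [pvLe_antisymm (hmin m hmem) (hall a haL)]

-- ===== VERDICT (by name: the statement is the Claim_ definition above) =====
theorem select_preferred_weather_forecast_type_py_spec : Claim_equal_select_preferred_weather_forecast_type_py := by
  intro forecast_types _
  unfold Spec_select_preferred_weather_forecast_type_py select_preferred_weather_forecast_type_py
    select_preferred_weather_forecast_type_py_alt
  exact pvCore _
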